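-- pv_equiv track=rewrite | github.com/jonatasteixeira-zz/cracking-the-code-interview | 5-bit-manipulation/5.8_draw_line.py | print_screen
-- ===== SOURCE A (Python) =====
-- def print_screen(screen, w):
--     idx = 0
--     res = ""
--     while idx < len(screen):
--         if idx % w == 0:
--             res += "\n"
--         res += screen[idx]
--         idx += 1
--     return res
-- ===== SOURCE B (Python) =====
-- def print_screen(screen, w):
--     return "".join("\n" + "".join(screen[i:i + w])
--                    for i in range(0, len(screen), w))
-- ===== Notes on version B (the rewrite author's own statement) =====
-- stated objective: faster
-- what changed: Replaces A's per-character while loop with repeated string += and an idx % w test by a single ''.join over per-chunk slices screen[i:i+w] for i in range(0, len(screen), w). Pre_ requires a positive width: at w == 0 A raises ZeroDivisionError on non-empty screens and B's range raises ValueError, and for the remaining non-positive widths line-wrapping is unspecified, so A's and B's values are equally defensible and neither is worth specifying.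
-- outside the precondition, e.g. on print_screen([], 0): A returns '', B raises ValueError; on print_screen(['a', 'b'], -1): A returns '\na\nb', B returns ''
import Mathlib
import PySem

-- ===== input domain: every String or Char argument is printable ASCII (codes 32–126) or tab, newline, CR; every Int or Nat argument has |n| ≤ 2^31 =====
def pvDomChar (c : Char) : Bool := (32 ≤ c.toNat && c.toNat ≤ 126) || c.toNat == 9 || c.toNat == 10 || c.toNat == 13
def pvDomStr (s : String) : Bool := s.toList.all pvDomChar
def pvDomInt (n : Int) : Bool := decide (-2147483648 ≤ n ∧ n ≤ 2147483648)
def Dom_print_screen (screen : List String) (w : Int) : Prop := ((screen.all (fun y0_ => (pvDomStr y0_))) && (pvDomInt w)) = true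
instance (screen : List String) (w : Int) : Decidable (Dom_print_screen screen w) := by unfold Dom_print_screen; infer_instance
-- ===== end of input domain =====

-- B replaces A's per-character while loop with repeated string += (quadratic in CPython)
-- by one ''.join over per-chunk slices screen[i:i+w], i in range(0, len(screen), w).

-- ===== PORT A =====
-- while idx < len(screen): if idx % w == 0: res += "\n"; res += screen[idx]; idx += 1
def printScreenLoopA (screen : List String) (w : Int) (idx : Nat) (res : String) : String :=
  if h : idx < screen.length then
    let res := if PySem.Int.mod (idx : Int) w = 0 then res ++ "\n" else res
    printScreenLoopA screen w (idx + 1) (res ++ screen[idx])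
  else res
termination_by screen.length - idx

def print_screen (screen : List String) (w : Int) : String :=
  printScreenLoopA screen w 0 ""

-- ===== PORT B =====
def print_screen_alt (screen : List String) (w : Int) : String :=
  PySem.Str.join "" ((PySem.List.pyRange 0 (screen.length : Int) w).map
    (fun i => "\n" ++ PySem.Str.join "" (PySem.List.slice screen (some i) (some (i + w)))))

-- ===== PRECONDITION & SPEC =====
-- Pre_ requires a positive width: at w == 0 A raises ZeroDivisionError on non-empty screens
-- and B's range raises ValueError, and for the remaining non-positive widths line-wrapping
-- is unspecified, so A's and B's values are equally defensible and neither is worth specifying.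
def Pre_print_screen (screen : List String) (w : Int) : Prop := 1 ≤ w
instance (screen : List String) (w : Int) : Decidable (Pre_print_screen screen w) := by unfold Pre_print_screen; infer_instance

def pvWitness_print_screen : List String × Int := (["ab", "c", "de", "f"], 2)

def Spec_print_screen (screen : List String) (w : Int) (out : String) : Prop := out = print_screen_alt screen w
instance (screen : List String) (w : Int) (out : String) : Decidable (Spec_print_screen screen w out) := by unfold Spec_print_screen; infer_instance

-- ===== CLAIM (what is proved, stated in full; the proofs are below) =====
def Claim_equal_print_screen : Prop := ∀ (screen : List String) (w : Int), Dom_print_screen screen w → Pre_print_screen screen w → Spec_print_screen screen w (print_screen screen w)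

-- ===== LEMMAS AND PROOFS =====

-- "".join distributes over cons / nil (Python str concatenation level).
theorem strJoin_nil : PySem.Str.join "" [] = "" := by decide

theorem strJoin_cons (x : String) (l : List String) :
    PySem.Str.join "" (x :: l) = x ++ PySem.Str.join "" l := by
  apply String.toList_inj.mp
  simp [PySem.Str.toList_join, PySem.Chars.join, String.toList_append, List.intercalate]
  cases l <;> simp

-- range(a, b, s) for positive s is empty when b ≤ a, else starts with a and steps by s.
theorem pyRangeStep_nil (a b s : Int) (hs : 0 < s) (h : b ≤ a) :
    PySem.List.pyRange a b s = [] := by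
  rw [PySem.List.pyRange_of_pos a b hs]
  simp [not_lt.mpr h]

theorem pyRangeStep_cons (a b s : Int) (hs : 0 < s) (h : a < b) :
    PySem.List.pyRange a b s = a :: PySem.List.pyRange (a + s) b s := by
  rw [PySem.List.pyRange_of_pos a b hs, PySem.List.pyRange_of_pos (a + s) b hs]
  have hsne : s ≠ 0 := ne_of_gt hs
  have hc : (b - a + s - 1) / s = (b - a - 1) / s + 1 := by
    have he : b - a + s - 1 = (b - a - 1) + 1 * s := by ring
    rw [he, Int.add_mul_ediv_right _ _ hsne]
  have hc2 : 0 ≤ (b - a - 1) / s := Int.ediv_nonneg (by omega) (le_of_lt hs)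
  rw [if_pos h, hc]
  have htn : ((b - a - 1) / s + 1).toNat = ((b - a - 1) / s).toNat + 1 := by omega
  rw [htn, List.range_succ_eq_map, List.map_cons, List.map_map]
  by_cases h2 : a + s < b
  · rw [if_pos h2]
    have he2 : b - (a + s) + s - 1 = b - a - 1 := by ring
    rw [he2]
    refine List.cons_eq_cons.mpr ⟨by ring, ?_⟩
    apply List.map_congr_left
    intro k _
    simp [Function.comp, Nat.succ_eq_add_one]
    push_cast
    ring
  · rw [if_neg h2]
    have hz : (b - a - 1) / s = 0 := Int.ediv_eq_zero_of_lt (by omega) (by omega)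
    rw [hz]
    refine List.cons_eq_cons.mpr ⟨by push_cast; ring, by simp⟩

-- A's newline test idx % w == 0 is divisibility by |w|.
theorem modZero_iff (idx : Nat) (w : Int) :
    (PySem.Int.mod (idx : Int) w = 0) ↔ w.natAbs ∣ idx := by
  rw [PySem.Int.mod_eq_zero_iff_dvd, ← Int.natAbs_dvd, Int.natCast_dvd_natCast]

-- Inner chunk lemma: running A's loop across the j characters before the next chunk
-- boundary appends exactly those j screen entries (no newline is inserted inside a chunk).
theorem loopA_chunk (screen : List String) (w : Int) :
    ∀ (j base : Nat) (res : String), w.natAbs ∣ base → j < w.natAbs →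
      printScreenLoopA screen w (base + (w.natAbs - j)) res =
      printScreenLoopA screen w (base + w.natAbs)
        (res ++ PySem.Str.join "" ((screen.drop (base + (w.natAbs - j))).take j)) := by
  intro j
  induction j with
  | zero =>
    intro base res hdvd hj
    simp [strJoin_nil]
  | succ j ih =>
    intro base res hdvd hj
    by_cases hlt : base + (w.natAbs - (j + 1)) < screen.length
    · conv_lhs => rw [printScreenLoopA]
      rw [dif_pos hlt]
      have hnd : ¬ (PySem.Int.mod ((base + (w.natAbs - (j + 1)) : Nat) : Int) w = 0) := by
        rw [modZero_iff]
        intro hdvd2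
        have hd : w.natAbs ∣ (w.natAbs - (j + 1)) := (Nat.dvd_add_right hdvd).mp hdvd2
        have := Nat.le_of_dvd (by omega) hd
        omega
      rw [if_neg hnd]
      have hp : base + (w.natAbs - (j + 1)) + 1 = base + (w.natAbs - j) := by omega
      rw [hp, ih base (res ++ screen[base + (w.natAbs - (j + 1))]) hdvd (by omega)]
      congr 1
      rw [List.drop_eq_getElem_cons hlt, hp]
      rw [List.take_succ_cons, strJoin_cons, String.append_assoc]
    · conv_lhs => rw [printScreenLoopA]
      rw [dif_neg hlt]
      have hge : screen.length ≤ base + w.natAbs := by omega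
      conv_rhs => rw [printScreenLoopA]
      rw [dif_neg (by omega : ¬ base + w.natAbs < screen.length)]
      rw [List.drop_eq_nil_of_le (by omega), List.take_nil, strJoin_nil, String.append_empty]

-- Main loop characterisation: from a chunk boundary, A's loop is B's join over the remaining chunks.
theorem loopA_eq_chunks (screen : List String) (w : Int) (hw : w ≠ 0) :
    ∀ (K idx : Nat) (res : String), screen.length - idx ≤ K → w.natAbs ∣ idx →
      printScreenLoopA screen w idx res =
      res ++ PySem.Str.join "" ((PySem.List.pyRange (idx : Int) (screen.length : Int) (w.natAbs : Int)).map
        (fun i => "\n" ++ PySem.Str.join "" (PySem.List.slice screen (some i) (some (i + (w.natAbs : Int)))))) := by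
  have hstep : 0 < w.natAbs := Int.natAbs_pos.mpr hw
  intro K
  induction K with
  | zero =>
    intro idx res hK hdvd
    have hge : ¬ idx < screen.length := by omega
    conv_lhs => rw [printScreenLoopA]
    rw [dif_neg hge]
    rw [pyRangeStep_nil _ _ _ (by exact_mod_cast hstep) (by exact_mod_cast (by omega : screen.length ≤ idx))]
    simp [strJoin_nil]
  | succ K ih =>
    intro idx res hK hdvd
    by_cases hlt : idx < screen.length
    · conv_lhs => rw [printScreenLoopA]
      rw [dif_pos hlt, if_pos ((modZero_iff idx w).mpr hdvd)]
      have h1 : idx + 1 = idx + (w.natAbs - (w.natAbs - 1)) := by omega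
      rw [h1, loopA_chunk screen w (w.natAbs - 1) idx _ hdvd (by omega)]
      rw [ih (idx + w.natAbs) _ (by omega) (Nat.dvd_add hdvd (Nat.dvd_refl _))]
      rw [pyRangeStep_cons (idx : Int) (screen.length : Int) (w.natAbs : Int)
            (by exact_mod_cast hstep) (by exact_mod_cast hlt)]
      rw [List.map_cons, strJoin_cons, PySem.List.slice_natCast_add screen idx w.natAbs]
      have hcast : ((idx : Int) + (w.natAbs : Int)) = ((idx + w.natAbs : Nat) : Int) := by push_cast; ring
      rw [hcast]
      rw [List.drop_eq_getElem_cons hlt]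
      have htake : List.take w.natAbs (screen[idx] :: List.drop (idx + 1) screen)
          = screen[idx] :: List.take (w.natAbs - 1) (List.drop (idx + 1) screen) := by
        obtain ⟨m, hm⟩ : ∃ m, w.natAbs = m + 1 := ⟨w.natAbs - 1, by omega⟩
        rw [hm, List.take_succ_cons]
        simp
      have h2 : idx + (w.natAbs - (w.natAbs - 1)) = idx + 1 := by omega
      rw [htake, strJoin_cons, h2]
      simp [String.append_assoc]
    · conv_lhs => rw [printScreenLoopA]
      rw [dif_neg hlt]
      rw [pyRangeStep_nil _ _ _ (by exact_mod_cast hstep) (by exact_mod_cast (by omega : screen.length ≤ idx))]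
      simp [strJoin_nil]

-- ===== VERDICT (by name: the statement is the Claim_ definition above) =====
theorem print_screen_spec : Claim_equal_print_screen := by
  intro screen w _ hpre
  unfold Pre_print_screen at hpre
  have hw : w ≠ 0 := by omega
  have hco : ((w.natAbs : Int)) = w := Int.natAbs_of_nonneg (by omega)
  unfold Spec_print_screen print_screen print_screen_alt
  rw [loopA_eq_chunks screen w hw screen.length 0 "" (by omega) (Nat.dvd_zero _),
      String.empty_append, hco]
  norm_num
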